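-- pv_equiv track=rewrite | github.com/daikichiba9511/atcoder | tessoku/B14.py | enumerated_summations
-- ===== SOURCE A (Python) =====
-- def enumerated_summations(l):
--     """lで与えられた組み合わせの総和であり得るものを列挙する"""
--     enumerated_sums = []
--     enumerated_sums_append = enumerated_sums.append
--     for i in range(2 ** len(l)):
--         summation = 0
--         # 0 -> len(l)桁目まで見ていく
--         for j in range(len(l)):
--             # 順番に見ていってj桁目のビットがたってたら足す
--             if (i >> j) & 1:
--                 summation += l[j]
--         enumerated_sums_append(summation)
--     return enumerated_sums
-- ===== SOURCE B (Python) =====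
-- def enumerated_summations(l):
--     """lで与えられた組み合わせの総和であり得るものを列挙する"""
--     sums = [0]
--     for x in l:
--         sums = sums + [s + x for s in sums]
--     return sums
-- ===== Notes on version B (the rewrite author's own statement) =====
-- stated objective: faster
-- what changed: Replaces the per-mask inner bit-scan (recomputing each subset sum from scratch, O(n*2^n)) with a doubling DP that extends the list of subset sums once per element (O(2^n)), same bitmask order; intended as faster: measured 17.4x at n=16, the largest size where both finish (at n=64 the 2^64-element output is infeasible for either).
import Mathlib
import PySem

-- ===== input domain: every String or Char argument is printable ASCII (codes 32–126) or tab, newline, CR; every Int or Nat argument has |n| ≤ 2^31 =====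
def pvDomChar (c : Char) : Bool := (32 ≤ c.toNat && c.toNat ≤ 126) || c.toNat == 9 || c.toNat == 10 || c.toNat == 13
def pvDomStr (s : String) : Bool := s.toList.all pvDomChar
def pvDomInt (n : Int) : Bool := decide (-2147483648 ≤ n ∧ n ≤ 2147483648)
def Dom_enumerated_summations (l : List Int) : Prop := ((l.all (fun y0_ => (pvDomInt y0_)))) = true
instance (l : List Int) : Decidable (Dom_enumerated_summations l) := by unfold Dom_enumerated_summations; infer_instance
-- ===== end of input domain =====

-- ===== PORT A =====
-- B replaces A's per-mask bit-scan with a doubling DP over the elements (intended as faster; measured 17.4x at n=16, the largest size both finish).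
-- i and j drawn from pyRange 0 _ 1 are nonnegative, so i.toNat/j.toNat are exact for Python's (i >> j) & 1.
def enumerated_summations (l : List Int) : List Int :=
  (PySem.List.pyRange 0 (2 ^ l.length : Int) 1).map (fun i =>
    (PySem.List.pyRange 0 (l.length : Int) 1).foldl
      (fun summation j =>
        if (i.toNat >>> j.toNat) &&& 1 = 1 then summation + PySem.List.pyGetD l j 0
        else summation) 0)

-- ===== PORT B =====
def enumerated_summations_alt (l : List Int) : List Int :=
  l.foldl (fun sums x => sums ++ sums.map (fun s => s + x)) [0]

-- ===== PRECONDITION & SPEC =====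
def Spec_enumerated_summations (l : List Int) (out : List Int) : Prop := out = enumerated_summations_alt l
instance (l : List Int) (out : List Int) : Decidable (Spec_enumerated_summations l out) := by unfold Spec_enumerated_summations; infer_instance

-- ===== CLAIM =====
def Claim_equal_enumerated_summations : Prop := ∀ (l : List Int), Dom_enumerated_summations l → Spec_enumerated_summations l (enumerated_summations l)

-- ===== LEMMAS AND PROOFS =====
-- subset sum of l selected by the bits of i
def pvF (l : List Int) (i : Nat) : Int :=
  ((List.range l.length).map (fun j => if i.testBit j then l.getD j 0 else 0)).sum

theorem pv_bit_eq (i j : Nat) : ((i >>> j) &&& 1 = 1) = (i.testBit j = true) := by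
  simp [Nat.testBit, Nat.and_one_is_mod, Nat.one_and_eq_mod_two]

theorem pvA_eq (l : List Int) :
    enumerated_summations l = (List.range (2 ^ l.length)).map (pvF l) := by
  unfold enumerated_summations
  have h2 : (2 ^ l.length : Int) = ((2 ^ l.length : Nat) : Int) := by push_cast; ring
  rw [h2, PySem.List.pyRange_zero_natCast, PySem.List.pyRange_zero_natCast, List.map_map]
  refine List.map_congr_left (fun i _ => ?_)
  simp only [Function.comp, List.foldl_map, Int.toNat_natCast, PySem.List.pyGetD_natCast]
  have hstep : (fun (s : Int) (j : Nat) => if (i >>> j) &&& 1 = 1 then s + l.getD j 0 else s)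
      = fun s j => s + (if i.testBit j then l.getD j 0 else 0) := by
    funext s j
    simp only [pv_bit_eq]
    split_ifs <;> simp
  rw [hstep, PySem.List.foldl_add]
  simp [pvF]

theorem pvF_snoc_lo (l : List Int) (x : Int) (i : Nat) (h : i < 2 ^ l.length) :
    pvF (l ++ [x]) i = pvF l i := by
  unfold pvF
  rw [List.length_append, List.length_singleton, List.range_succ, List.map_append,
    List.sum_append]
  have h1 : ∀ j ∈ List.range l.length,
      (if i.testBit j then (l ++ [x]).getD j 0 else 0)
        = (if i.testBit j then l.getD j 0 else 0) := by
    intro j hj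
    rw [List.getD_append _ _ _ _ (List.mem_range.mp hj)]
  rw [List.map_congr_left h1]
  simp [Nat.testBit_lt_two_pow h]

theorem pvF_snoc_hi (l : List Int) (x : Int) (i : Nat) (h : i < 2 ^ l.length) :
    pvF (l ++ [x]) (2 ^ l.length + i) = pvF l i + x := by
  unfold pvF
  rw [List.length_append, List.length_singleton, List.range_succ, List.map_append,
    List.sum_append]
  have h1 : ∀ j ∈ List.range l.length,
      (if (2 ^ l.length + i).testBit j then (l ++ [x]).getD j 0 else 0)
        = (if i.testBit j then l.getD j 0 else 0) := by
    intro j hj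
    rw [List.getD_append _ _ _ _ (List.mem_range.mp hj),
      Nat.testBit_two_pow_add_gt (List.mem_range.mp hj) i]
  rw [List.map_congr_left h1]
  have hp : 0 < 2 ^ l.length := Nat.two_pow_pos l.length
  have hd : (2 ^ l.length + i) / 2 ^ l.length = 1 := by
    rw [Nat.add_comm, Nat.add_div_right _ hp, Nat.div_eq_of_lt h]
  have hb : (2 ^ l.length + i).testBit l.length = true := by
    have hs : (2 ^ l.length + i) >>> l.length = 1 := by
      rw [Nat.shiftRight_eq_div_pow, hd]
    simp [Nat.testBit, hs]
  simp [hb]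

theorem pvA_snoc (l : List Int) (x : Int) :
    (List.range (2 ^ (l ++ [x]).length)).map (pvF (l ++ [x]))
      = (List.range (2 ^ l.length)).map (pvF l)
        ++ ((List.range (2 ^ l.length)).map (pvF l)).map (fun s => s + x) := by
  have hlen : 2 ^ (l ++ [x]).length = 2 ^ l.length + 2 ^ l.length := by
    rw [List.length_append, List.length_singleton, pow_succ]; ring
  rw [hlen, List.range_add, List.map_append, List.map_map, List.map_map]
  congr 1
  · exact List.map_congr_left (fun i hi => pvF_snoc_lo l x i (List.mem_range.mp hi))
  · exact List.map_congr_left (fun i hi => by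
      simpa using pvF_snoc_hi l x i (List.mem_range.mp hi))

theorem pvMain (l : List Int) :
    (List.range (2 ^ l.length)).map (pvF l) = enumerated_summations_alt l := by
  induction l using List.reverseRecOn with
  | nil => decide
  | append_singleton l x ih =>
      rw [pvA_snoc, ih]
      unfold enumerated_summations_alt
      rw [List.foldl_append]
      rfl

-- ===== VERDICT =====
theorem enumerated_summations_spec : Claim_equal_enumerated_summations := by
  intro l _
  unfold Spec_enumerated_summations
  rw [pvA_eq, pvMain]
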